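-- pv_equiv track=rewrite | github.com/lcsm29/goog-foobar | level1/braille_translation/solution.py | solution_dict
-- ===== SOURCE A (Python) =====
-- def solution_dict(word):
--     caps = 'ABCDEFGHIJKLMNOPQRSTUVWXYZ'
--     answer = ''
--     for c in word:
--         if c in caps:
--             answer += '000001'
--             c = c.lower()
--         answer += braille_dict[c]
--     return answer
--
-- braille_dict = {
--     'a': '100000', 'b': '110000', 'c': '100100', 'd': '100110',
--     'e': '100010', 'f': '110100', 'g': '110110', 'h': '110010',
--     'i': '010100', 'j': '010110', 'k': '101000', 'l': '111000',
--     'm': '101100', 'n': '101110', 'o': '101010', 'p': '111100',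
--     'q': '111110', 'r': '111010', 's': '011100', 't': '011110',
--     'u': '101001', 'v': '111001', 'w': '010111', 'x': '101101',
--     'y': '101111', 'z': '101011', ' ': '000000'
-- }
-- ===== SOURCE B (Python) =====
-- # B computes each letter's cell arithmetically from braille's decade structure
-- # (code = base pattern of a-j with dots 3/6 set by the decade; w irregular),
-- # storing only ten base patterns instead of a 27-entry table.
-- _BASE10 = ['100000', '110000', '100100', '100110', '100010',
--            '110100', '110110', '110010', '010100', '010110']
--
-- def _code(c):
--     if c == ' ':
--         return '000000'
--     if c == 'w':
--         return '010111'
--     i = ord(c) - ord('a')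
--     if c > 'w':          # u,v,x,y,z form the third decade; w is irregular
--         i -= 1
--     d, r = divmod(i, 10)
--     b = _BASE10[r]
--     return b[:2] + ('1' if d >= 1 else '0') + b[3:5] + ('1' if d == 2 else '0')
--
-- def solution_dict(word):
--     out = []
--     for c in word:
--         if 'A' <= c <= 'Z':
--             out.append('000001' + _code(chr(ord(c) + 32)))
--         else:
--             out.append(_code(c))
--     return ''.join(out)
-- ===== Notes on version B (the rewrite author's own statement) =====
-- stated objective: alternative
-- what changed: B drops the 27-entry code table entirely and computes each letter's cell arithmetically from braille's decade structure (ten stored base patterns for a-j; dots 3 and 6 set by divmod of the alphabet index, with the irregular 'w' special-cased), collecting per-character codes in a list joined once; Pre_ excludes words containing characters other than letters and space, on which A raises KeyError.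
import Mathlib
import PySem

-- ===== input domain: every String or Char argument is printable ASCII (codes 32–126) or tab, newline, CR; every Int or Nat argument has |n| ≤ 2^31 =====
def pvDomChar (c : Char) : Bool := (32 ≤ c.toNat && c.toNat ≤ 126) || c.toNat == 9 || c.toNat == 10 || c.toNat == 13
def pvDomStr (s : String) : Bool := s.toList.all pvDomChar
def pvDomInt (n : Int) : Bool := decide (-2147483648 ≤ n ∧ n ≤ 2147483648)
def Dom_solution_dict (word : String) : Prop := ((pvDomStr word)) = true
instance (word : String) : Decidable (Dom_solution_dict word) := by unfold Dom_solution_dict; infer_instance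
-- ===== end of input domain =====

-- B replaces A's 27-entry lookup table with arithmetic on braille's decade
-- structure (ten base patterns, dots 3/6 derived by divmod, 'w' irregular);
-- objective: alternative.


-- ===== PORT A =====
def brailleDict : PySem.Dict Char (List Char) := PySem.Dict.ofList [
  ('a', "100000".toList), ('b', "110000".toList), ('c', "100100".toList), ('d', "100110".toList),
  ('e', "100010".toList), ('f', "110100".toList), ('g', "110110".toList), ('h', "110010".toList),
  ('i', "010100".toList), ('j', "010110".toList), ('k', "101000".toList), ('l', "111000".toList),
  ('m', "101100".toList), ('n', "101110".toList), ('o', "101010".toList), ('p', "111100".toList),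
  ('q', "111110".toList), ('r', "111010".toList), ('s', "011100".toList), ('t', "011110".toList),
  ('u', "101001".toList), ('v', "111001".toList), ('w', "010111".toList), ('x', "101101".toList),
  ('y', "101111".toList), ('z', "101011".toList), (' ', "000000".toList)]

-- getD … [] stands for braille_dict[c]; Pre_ keeps exactly the inputs where the key is present (KeyError otherwise)
def solution_dict (word : String) : String :=
  String.mk (word.toList.foldl (fun answer c =>
    let p : List Char × Char :=
      if "ABCDEFGHIJKLMNOPQRSTUVWXYZ".toList.contains c then
        (answer ++ "000001".toList, PySem.Chars.lowerChar c)
      else (answer, c)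
    p.1 ++ brailleDict.getD p.2 []) [])

-- ===== PORT B =====
def base10 : List (List Char) :=
  ["100000".toList, "110000".toList, "100100".toList, "100110".toList, "100010".toList,
   "110100".toList, "110110".toList, "110010".toList, "010100".toList, "010110".toList]

-- _code: arithmetic decade derivation (getD [] stands for the always-in-range _BASE10[r])
def codeChar (c : Char) : List Char :=
  if c = ' ' then "000000".toList
  else if c = 'w' then "010111".toList
  else
    let i0 : Int := (c.toNat : Int) - 97
    let i : Int := if 'w' < c then i0 - 1 else i0
    let d := PySem.Int.floordiv i 10
    let r := PySem.Int.mod i 10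
    let b := (PySem.List.pyGet? base10 r).getD []
    PySem.List.slice b none (some 2) ++ (if 1 ≤ d then "1".toList else "0".toList)
      ++ PySem.List.slice b (some 3) (some 5) ++ (if d = 2 then "1".toList else "0".toList)

def solution_dict_alt (word : String) : String :=
  String.mk (PySem.Chars.join [] (word.toList.foldl (fun out c =>
    out ++ [if 'A' ≤ c ∧ c ≤ 'Z' then "000001".toList ++ codeChar (Char.ofNat (c.toNat + 32))
            else codeChar c]) []))

-- ===== PRECONDITION & SPEC =====
-- Pre_ excludes words with a character other than a letter or space: there A
-- raises KeyError (braille_dict has no such key).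
def Pre_solution_dict (word : String) : Prop :=
  (word.toList.all (fun c =>
    "abcdefghijklmnopqrstuvwxyz ABCDEFGHIJKLMNOPQRSTUVWXYZ".toList.contains c)) = true
instance (word : String) : Decidable (Pre_solution_dict word) := by
  unfold Pre_solution_dict; infer_instance
def pvWitness_solution_dict : String := "Hello World"

def Spec_solution_dict (word : String) (out : String) : Prop := out = solution_dict_alt word
instance (word : String) (out : String) : Decidable (Spec_solution_dict word out) := by unfold Spec_solution_dict; infer_instance

-- ===== CLAIM (what is proved, stated in full; the proofs are below) =====
def Claim_equal_solution_dict : Prop := ∀ (word : String), Dom_solution_dict word → Pre_solution_dict word → Spec_solution_dict word (solution_dict word)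

-- ===== LEMMAS AND PROOFS =====
theorem join_nil_flatten (xs : List (List Char)) :
    PySem.Chars.join [] xs = xs.flatten := by
  induction xs with
  | nil => simp [PySem.Chars.join, List.intercalate]
  | cons a xs ih =>
    cases xs with
    | nil => simp [PySem.Chars.join, List.intercalate]
    | cons b ys =>
      rw [PySem.Chars.join_cons_cons, ih]
      simp

-- B's per-character item
def itemB (c : Char) : List Char :=
  if 'A' ≤ c ∧ c ≤ 'Z' then "000001".toList ++ codeChar (Char.ofNat (c.toNat + 32))
  else codeChar c

-- A's per-character step value equals B's arithmetically derived item, for every allowed character.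
theorem step_eq_item :
    ("abcdefghijklmnopqrstuvwxyz ABCDEFGHIJKLMNOPQRSTUVWXYZ".toList.all (fun c =>
      (if "ABCDEFGHIJKLMNOPQRSTUVWXYZ".toList.contains c then
        "000001".toList ++ brailleDict.getD (PySem.Chars.lowerChar c) []
      else brailleDict.getD c []) == itemB c)) = true := by decide

theorem step_eq_item' (c : Char)
    (h : "abcdefghijklmnopqrstuvwxyz ABCDEFGHIJKLMNOPQRSTUVWXYZ".toList.contains c = true) :
    (if "ABCDEFGHIJKLMNOPQRSTUVWXYZ".toList.contains c then
      "000001".toList ++ brailleDict.getD (PySem.Chars.lowerChar c) []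
    else brailleDict.getD c []) = itemB c := by
  have := List.all_eq_true.mp step_eq_item c (List.contains_iff_mem.mp h)
  exact beq_iff_eq.mp this

theorem foldl_items_eq_map (l : List Char) (acc : List (List Char)) :
    l.foldl (fun out c =>
      out ++ [if 'A' ≤ c ∧ c ≤ 'Z' then "000001".toList ++ codeChar (Char.ofNat (c.toNat + 32))
              else codeChar c]) acc = acc ++ l.map itemB := by
  induction l generalizing acc with
  | nil => simp
  | cons c l ih =>
    simp only [List.foldl_cons, List.map_cons]
    rw [ih]
    simp [itemB]

theorem foldl_eq_flatten (l : List Char) (acc : List Char)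
    (h : ∀ c ∈ l, "abcdefghijklmnopqrstuvwxyz ABCDEFGHIJKLMNOPQRSTUVWXYZ".toList.contains c = true) :
    l.foldl (fun answer c =>
      let p : List Char × Char :=
        if "ABCDEFGHIJKLMNOPQRSTUVWXYZ".toList.contains c then
          (answer ++ "000001".toList, PySem.Chars.lowerChar c)
        else (answer, c)
      p.1 ++ brailleDict.getD p.2 []) acc
    = acc ++ (l.map itemB).flatten := by
  induction l generalizing acc with
  | nil => simp
  | cons c l ih =>
    have hc := h c (List.mem_cons_self ..)
    have hrest : ∀ x ∈ l, _ = true := fun x hx => h x (List.mem_cons_of_mem _ hx)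
    simp only [List.foldl_cons, List.map_cons, List.flatten_cons]
    rw [ih _ hrest]
    have hstep := step_eq_item' c hc
    by_cases hcap : "ABCDEFGHIJKLMNOPQRSTUVWXYZ".toList.contains c = true
    · simp only [hcap, if_true] at hstep ⊢
      simp [← hstep, List.append_assoc]
    · simp only [Bool.not_eq_true] at hcap
      simp only [hcap, Bool.false_eq_true, if_false] at hstep ⊢
      simp [← hstep, List.append_assoc]

-- ===== VERDICT (by name: the statement is the Claim_ definition above) =====
theorem solution_dict_spec : Claim_equal_solution_dict := by
  intro word _ hpre
  unfold Spec_solution_dict solution_dict solution_dict_alt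
  rw [foldl_eq_flatten _ _ (List.all_eq_true.mp hpre), foldl_items_eq_map,
    join_nil_flatten]
  simp
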